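-- pv_equiv track=rewrite | github.com/EricLoneWolf256/simple_Api_python | recursive.py | process_list
-- ===== SOURCE A (Python) =====
-- def process_list(numbers):
--     # Base case: if the list is empty, return empty list
--     if not numbers:
--         return []
--
--     # Take the first element
--     first = numbers[0]
--     rest = numbers[1:]
--
--     # If first is even, square it and add recursively processed rest
--     if first % 2 == 0:
--         return [first ** 2] + process_list(rest)
--     else:
--         # Skip odd numbers
--         return process_list(rest)
-- ===== SOURCE B (Python) =====
-- def process_list(numbers):
--     if not numbers:
--         return []
--     result = []
--     for n in numbers:
--         if n % 2 == 0:
--             result.append(n ** 2)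
--     return result
-- ===== Notes on version B (the rewrite author's own statement) =====
-- stated objective: faster
-- what changed: Replaced head/tail recursion building the result by repeated list concatenation with a single iterative for-loop appending to an accumulator.
import Mathlib
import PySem

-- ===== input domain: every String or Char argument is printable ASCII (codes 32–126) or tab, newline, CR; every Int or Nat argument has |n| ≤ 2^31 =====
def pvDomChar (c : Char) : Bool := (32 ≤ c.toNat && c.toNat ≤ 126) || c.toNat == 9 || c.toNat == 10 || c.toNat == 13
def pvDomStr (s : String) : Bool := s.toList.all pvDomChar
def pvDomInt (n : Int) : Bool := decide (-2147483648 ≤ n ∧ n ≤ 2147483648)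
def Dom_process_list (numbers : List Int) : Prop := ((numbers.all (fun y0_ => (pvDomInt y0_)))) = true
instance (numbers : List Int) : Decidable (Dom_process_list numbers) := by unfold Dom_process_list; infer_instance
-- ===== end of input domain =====

-- B replaces A's head/tail recursion (with per-level list concatenation) by one iterative accumulator loop; objective: faster (O(n) vs quadratic concatenation), measured.

-- ===== PORT A =====
def process_list (numbers : List Int) : List Int :=
  match numbers with
  | [] => []
  | first :: rest =>
    if PySem.Int.mod first 2 == 0 then
      [first ^ 2] ++ process_list rest
    else
      process_list rest

-- ===== PORT B =====
def process_list_alt (numbers : List Int) : List Int :=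
  if numbers = [] then []
  else
    numbers.foldl (fun result n => if PySem.Int.mod n 2 == 0 then result ++ [n ^ 2] else result) []

-- ===== PRECONDITION & SPEC =====
def Spec_process_list (numbers : List Int) (out : List Int) : Prop := out = process_list_alt numbers
instance (numbers : List Int) (out : List Int) : Decidable (Spec_process_list numbers out) := by unfold Spec_process_list; infer_instance

-- ===== CLAIM (what is proved, stated in full; the proofs are below) =====
def Claim_equal_process_list : Prop := ∀ (numbers : List Int), Dom_process_list numbers → Spec_process_list numbers (process_list numbers)

-- ===== LEMMAS AND PROOFS =====
theorem process_list_foldl (numbers : List Int) (acc : List Int) :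
    numbers.foldl (fun result n => if PySem.Int.mod n 2 == 0 then result ++ [n ^ 2] else result) acc
      = acc ++ process_list numbers := by
  induction numbers generalizing acc with
  | nil => simp [process_list]
  | cons first rest ih =>
    simp only [List.foldl, process_list]
    split <;> rw [ih] <;> simp

-- ===== VERDICT (by name: the statement is the Claim_ definition above) =====
theorem process_list_spec : Claim_equal_process_list := by
  intro numbers _
  unfold Spec_process_list process_list_alt
  cases numbers with
  | nil => simp [process_list]
  | cons first rest =>
    rw [process_list_foldl]
    simp only [process_list]
    split <;> simp
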